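-- pv_equiv track=rewrite | github.com/nguyendinhanh/Ciphers | Caesar Complex.py | create_shift_table
-- ===== SOURCE A (Python) =====
-- import string
--
-- def create_shift_table(shift):
--     '''
--     Creates a dictionary that can be used to apply a cipher to a letter.
--     The dictionary maps every uppercase and lowercase letter to a
--     character shifted down the alphabet by the input shift. The dictionary
--     should have 52 keys of all the uppercase letters and all the lowercase
--     letters only.
--
--     shift (int): the amount by which to shift every letter of the
--     alphabet, 0 <= shift < N_LETTERS. If shift is less than zero or
--     greater than or equal to N_LETTERS, this function must raise a
--     ValueError() exception.
--
--     Returns: a dictionary mapping a letter (str) to another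
--              letter (str), for all lower and upper case letters.
--     '''
--     # YOUR CODE HERE
--     if shift < 0:
--         raise ValueError()
--     elif shift >=26:
--         raise ValueError()
--
--     letters = string.ascii_lowercase
--     letters_shifted = (letters * 2)[shift : shift + 26]
--     letters = letters + letters.upper()
--     letters_shifted = letters_shifted + letters_shifted.upper()
--
--     shift_dict = {}
--
--     for i in range(52):
--         shift_dict[letters[i]] = letters_shifted[i]
--
--     return shift_dict
-- ===== SOURCE B (Python) =====
-- import string
--
-- def _shift_char(c, shift):
--     base = ord('a') if c.islower() else ord('A')
--     return chr((ord(c) - base + shift) % 26 + base)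
--
-- def create_shift_table(shift):
--     if shift < 0 or shift >= 26:
--         raise ValueError()
--     return {c: _shift_char(c, shift)
--             for c in string.ascii_lowercase + string.ascii_uppercase}
-- ===== Notes on version B (the rewrite author's own statement) =====
-- stated objective: idiomatic
-- what changed: B computes each letter's image with a closed-form modular formula chr((ord(c)-base+shift)%26+base) per character instead of building a rotated alphabet string via slicing (letters*2)[shift:shift+26] and pairing by index.
import Mathlib
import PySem

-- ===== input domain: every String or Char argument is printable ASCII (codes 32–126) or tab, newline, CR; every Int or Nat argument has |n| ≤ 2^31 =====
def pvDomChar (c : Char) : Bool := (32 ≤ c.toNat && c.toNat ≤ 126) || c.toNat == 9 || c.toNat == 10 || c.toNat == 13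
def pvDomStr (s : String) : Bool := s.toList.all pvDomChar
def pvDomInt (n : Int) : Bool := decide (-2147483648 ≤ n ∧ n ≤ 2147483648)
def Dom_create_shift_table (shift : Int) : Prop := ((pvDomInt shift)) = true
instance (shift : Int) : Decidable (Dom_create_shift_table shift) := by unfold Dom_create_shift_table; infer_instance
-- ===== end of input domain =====

-- B replaces A's rotated-alphabet slice with a per-letter modular formula (idiomatic; same cost).

-- ===== PORT A =====
-- A: rotate the lowercase alphabet by slicing (letters*2)[shift:shift+26], append the
-- uppercase versions of both strings, then for i in range(52) do
-- shift_dict[letters[i]] = letters_shifted[i].  Keys/values are one-character strings.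
-- The loop body 'shift_dict[letters[i]] = letters_shifted[i]' as a named helper:
def shiftTableStep (ks vs : List Char) (d : PySem.Dict String String) (i : Int) : PySem.Dict String String :=
  match PySem.List.pyGet? ks i, PySem.List.pyGet? vs i with
  | some k, some v => d.insert (String.ofList [k]) (String.ofList [v])
  | _, _ => d  -- IndexError; unreachable under Pre_ (both lists have 52 characters)

def create_shift_table (shift : Int) : List (String × String) :=
  let letters : List Char := "abcdefghijklmnopqrstuvwxyz".toList
  let letters_shifted : List Char := PySem.List.slice (letters ++ letters) (some shift) (some (shift + 26))
  let letters2 : List Char := letters ++ PySem.Chars.upper letters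
  let letters_shifted2 : List Char := letters_shifted ++ PySem.Chars.upper letters_shifted
  ((PySem.List.pyRange 0 52 1).foldl (shiftTableStep letters2 letters_shifted2) PySem.Dict.empty).items

-- ===== PORT B =====
-- B: _shift_char(c, shift) = chr((ord(c) - base + shift) % 26 + base),
-- base = ord('a') if c.islower() else ord('A'); dict comprehension over lower+upper alphabet.
def pvShiftChar (c : Char) (shift : Int) : Char :=
  let base : Int := if PySem.Chars.islower c then 97 else 65
  Char.ofNat (PySem.Int.mod ((c.toNat : Int) - base + shift) 26 + base).toNat

def pvAlphabet : List Char := "abcdefghijklmnopqrstuvwxyz".toList ++ "ABCDEFGHIJKLMNOPQRSTUVWXYZ".toList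

def create_shift_table_alt (shift : Int) : List (String × String) :=
  (pvAlphabet.foldl (fun d c => d.insert (String.ofList [c]) (String.ofList [pvShiftChar c shift]))
    (PySem.Dict.empty : PySem.Dict String String)).items

-- ===== PRECONDITION & SPEC =====
-- Pre_: exactly the shifts on which A returns (A raises ValueError for shift < 0 or shift ≥ 26).
def Pre_create_shift_table (shift : Int) : Prop := 0 ≤ shift ∧ shift < 26
instance (shift : Int) : Decidable (Pre_create_shift_table shift) := by unfold Pre_create_shift_table; infer_instance
def pvWitness_create_shift_table : Int := (3)
def Spec_create_shift_table (shift : Int) (out : List (String × String)) : Prop := out = create_shift_table_alt shift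
instance (shift : Int) (out : List (String × String)) : Decidable (Spec_create_shift_table shift out) := by unfold Spec_create_shift_table; infer_instance

-- ===== CLAIM (what is proved, stated in full; the proofs are below) =====
def Claim_equal_create_shift_table : Prop := ∀ (shift : Int), Dom_create_shift_table shift → Pre_create_shift_table shift → Spec_create_shift_table shift (create_shift_table shift)

-- ===== LEMMAS AND PROOFS =====

-- A's key list and value list, as standalone expressions (definitionally the let-bound
-- letters2 / letters_shifted2 of the port).
def aKeys : List Char := "abcdefghijklmnopqrstuvwxyz".toList ++ PySem.Chars.upper "abcdefghijklmnopqrstuvwxyz".toList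
def aVals (shift : Int) : List Char :=
  PySem.List.slice ("abcdefghijklmnopqrstuvwxyz".toList ++ "abcdefghijklmnopqrstuvwxyz".toList) (some shift) (some (shift + 26)) ++
  PySem.Chars.upper (PySem.List.slice ("abcdefghijklmnopqrstuvwxyz".toList ++ "abcdefghijklmnopqrstuvwxyz".toList) (some shift) (some (shift + 26)))

def pairStep (d : PySem.Dict String String) (p : Char × Char) : PySem.Dict String String :=
  d.insert (String.ofList [p.1]) (String.ofList [p.2])

-- Index loop 'for i in range(|pre|, |pre|+|ks|)' over (pre_k++ks, pre_v++vs) = fold over zip ks vs.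
theorem foldl_index_zip (ks : List Char) : ∀ (vs pk pv : List Char), ks.length = vs.length →
    pk.length = pv.length → ∀ (d : PySem.Dict String String),
    (PySem.List.pyRange (pk.length) (pk.length + ks.length) 1).foldl (shiftTableStep (pk ++ ks) (pv ++ vs)) d
      = (ks.zip vs).foldl pairStep d := by
  induction ks with
  | nil =>
    intro vs pk pv hl hp d
    cases vs with
    | cons v vs => simp at hl
    | nil => simp [PySem.List.pyRange_one_eq_nil (le_refl _)]
  | cons k ks ih =>
    intro vs pk pv hl hp d
    cases vs with
    | nil => simp at hl
    | cons v vs =>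
      have hcons : PySem.List.pyRange (pk.length) (pk.length + (k :: ks).length) 1
          = (pk.length : Int) :: PySem.List.pyRange ((pk.length : Int) + 1) (pk.length + (k :: ks).length) 1 := by
        apply PySem.List.pyRange_one_cons
        simp only [List.length_cons]
        push_cast
        omega
      rw [hcons]
      have hstep : shiftTableStep (pk ++ k :: ks) (pv ++ v :: vs) d (pk.length) = d.insert (String.ofList [k]) (String.ofList [v]) := by
        unfold shiftTableStep
        rw [PySem.List.pyGet?_append_length, hp, PySem.List.pyGet?_append_length]
      rw [List.foldl_cons, hstep]
      have hre : (PySem.List.pyRange ((pk.length : Int) + 1) (pk.length + (k :: ks).length) 1)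
          = PySem.List.pyRange ((pk ++ [k]).length) ((pk ++ [k]).length + ks.length) 1 := by
        have e1 : (((pk ++ [k]).length : Int)) = (pk.length : Int) + 1 := by
          simp only [List.length_append, List.length_cons, List.length_nil]; push_cast; omega
        have e2 : ((pk.length : Int) + ((k :: ks).length : Int)) = ((pk ++ [k]).length : Int) + (ks.length : Int) := by
          simp only [List.length_append, List.length_cons, List.length_nil]; push_cast; omega
        rw [e2, ← e1]
      rw [hre, show pk ++ k :: ks = (pk ++ [k]) ++ ks by simp, show pv ++ v :: vs = (pv ++ [v]) ++ vs by simp]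
      rw [ih vs (pk ++ [k]) (pv ++ [v]) (by simpa using hl) (by simp [hp])]
      simp [pairStep]

theorem foldl_top (ks vs : List Char) (hl : ks.length = vs.length) (d : PySem.Dict String String) :
    (PySem.List.pyRange 0 (ks.length) 1).foldl (shiftTableStep ks vs) d = (ks.zip vs).foldl pairStep d := by
  have h := foldl_index_zip ks vs [] [] hl rfl d
  simpa using h

theorem length_aVals (shift : Int) (h0 : 0 ≤ shift) (h26 : shift < 26) : (aVals shift).length = 52 := by
  unfold aVals
  rw [PySem.List.slice_toNat _ h0 (by omega)]
  simp [PySem.Chars.upper]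
  omega

-- ===== VERDICT (by name: the statement is the Claim_ definition above) =====
theorem create_shift_table_spec : Claim_equal_create_shift_table := by
  intro shift _ hpre
  obtain ⟨h0, h26⟩ := hpre
  unfold Spec_create_shift_table
  have hk : aKeys.length = 52 := by decide
  have hv : (aVals shift).length = 52 := length_aVals shift h0 h26
  show ((PySem.List.pyRange 0 52 1).foldl (shiftTableStep aKeys (aVals shift)) PySem.Dict.empty).items = _
  rw [show (52 : Int) = (aKeys.length : Int) by rw [hk]; rfl]
  rw [foldl_top aKeys (aVals shift) (by rw [hk, hv]) _]
  have hzip : aKeys.zip (aVals shift) = pvAlphabet.map (fun c => (c, pvShiftChar c shift)) := by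
    interval_cases shift <;> decide
  rw [hzip, List.foldl_map]
  rfl
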